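-- pv_equiv track=rewrite | github.com/Annarhysa/Codes | Python Programs/pin_generator.py | generate_pin
-- ===== SOURCE A (Python) =====
-- def generate_pin(numbers):
--     pin = ''
--     for num in numbers:
--         num_sum = sum(int(digit) for digit in str(num))
--         while num_sum > 9:
--             num_sum = sum(int(digit) for digit in str(num_sum))
--         if num_sum % 2 == 0:
--             pin += str(num_sum)
--         else:
--             pin += chr(ord('a') + num_sum - 1)
--     return pin
-- ===== SOURCE B (Python) =====
-- def generate_pin(numbers):
--     # Closed-form digital root instead of repeated string digit-sum collapse.
--     def root(n):
--         return 0 if n == 0 else 1 + (n - 1) % 9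
--     return ''.join(str(d) if d % 2 == 0 else chr(ord('a') + d - 1)
--                    for d in map(root, numbers))
-- ===== Notes on version B (the rewrite author's own statement) =====
-- stated objective: faster
-- what changed: Replaces the per-element string digit-sum plus iterative while-loop collapse with the closed-form digital root 0 if n==0 else 1+(n-1)%9 applied directly to the number (no str() conversions at all), and builds the pin with a single join instead of string concatenation in a loop.
import Mathlib
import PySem

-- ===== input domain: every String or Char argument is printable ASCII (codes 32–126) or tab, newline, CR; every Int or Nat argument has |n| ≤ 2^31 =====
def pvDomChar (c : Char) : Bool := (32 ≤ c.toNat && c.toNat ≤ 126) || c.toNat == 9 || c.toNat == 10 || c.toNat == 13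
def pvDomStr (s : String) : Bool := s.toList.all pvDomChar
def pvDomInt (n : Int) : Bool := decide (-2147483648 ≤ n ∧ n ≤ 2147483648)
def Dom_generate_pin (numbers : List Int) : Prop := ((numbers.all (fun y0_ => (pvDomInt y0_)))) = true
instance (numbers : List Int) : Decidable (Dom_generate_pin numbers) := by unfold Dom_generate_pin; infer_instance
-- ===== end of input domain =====

-- B replaces A's string digit-sum and iterative while-collapse by the closed-form
-- digital root 0/1+(n-1)%9 applied directly to each number (objective: faster, measured).

-- ===== PORT A =====
-- int(digit) for one char of str(num): exact on digit chars, which is all that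
-- occurs under Pre_ (every num ≥ 0).
def digitVal (c : Char) : Int := (c.toNat : Int) - 48

-- sum(int(digit) for digit in str(n))
def digitSumA (n : Int) : Int := ((PySem.Int.toChars n).map digitVal).sum

-- 'while num_sum > 9: num_sum = sum(int(d) for d in str(num_sum))', fuel-guarded
-- for totality only (fuel s.toNat suffices: the digit sum strictly decreases).
def collapseA : Nat → Int → Int
  | 0, s => s
  | f + 1, s => if s > 9 then collapseA f (digitSumA s) else s

-- one iteration of A's for-loop body: the chars appended to pin
def pieceA (num : Int) : List Char :=
  let s := collapseA (digitSumA num).toNat (digitSumA num)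
  if PySem.Int.mod s 2 = 0 then PySem.Int.toChars s
  else [Char.ofNat (97 + s - 1).toNat]   -- chr(ord('a') + num_sum - 1)

def generate_pin (numbers : List Int) : String :=
  String.ofList (numbers.foldl (fun pin num => pin ++ pieceA num) [])

-- ===== PORT B =====
-- closed-form digital root: 0 if n == 0 else 1 + (n - 1) % 9
def rootB (n : Int) : Int := if n = 0 then 0 else 1 + PySem.Int.mod (n - 1) 9

def pieceB (d : Int) : List Char :=
  if PySem.Int.mod d 2 = 0 then PySem.Int.toChars d
  else [Char.ofNat (96 + d).toNat]       -- chr(ord('a') + d - 1)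

def generate_pin_alt (numbers : List Int) : String :=
  String.ofList (((numbers.map rootB).map pieceB).flatten)

-- ===== PRECONDITION & SPEC =====
-- Pre_ excludes exactly the lists containing a negative number: there A raises
-- ValueError (int('-') on the sign character of str(num)).
def Pre_generate_pin (numbers : List Int) : Prop := ∀ n ∈ numbers, 0 ≤ n
instance (numbers : List Int) : Decidable (Pre_generate_pin numbers) := by unfold Pre_generate_pin; infer_instance

def pvWitness_generate_pin : List Int := [0, 5, 19, 123456]

def Spec_generate_pin (numbers : List Int) (out : String) : Prop := out = generate_pin_alt numbers
instance (numbers : List Int) (out : String) : Decidable (Spec_generate_pin numbers out) := by unfold Spec_generate_pin; infer_instance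

-- ===== CLAIM (what is proved, stated in full; the proofs are below) =====
def Claim_equal_generate_pin : Prop := ∀ (numbers : List Int), Dom_generate_pin numbers → Pre_generate_pin numbers → Spec_generate_pin numbers (generate_pin numbers)

-- ===== LEMMAS AND PROOFS =====

-- mathematical digit sum, in the shape of Nat.toDigitsCore's recursion
def dsum (n : Nat) : Nat :=
  if n < 10 then n else n % 10 + dsum (n / 10)
termination_by n
decreasing_by exact Nat.div_lt_self (by omega) (by omega)

-- mathematical digital root
def drootN (m : Nat) : Nat := if m = 0 then 0 else 1 + (m - 1) % 9

lemma digitVal_digitChar (m : Nat) (h : m < 10) : digitVal (Nat.digitChar m) = (m : Int) := by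
  interval_cases m <;> rfl

lemma charsum_toDigitsCore (f : Nat) : ∀ (n : Nat) (l : List Char), n < 10 ^ f →
    ((Nat.toDigitsCore 10 f n l).map digitVal).sum = (dsum n : Int) + (l.map digitVal).sum := by
  induction f with
  | zero =>
    intro n l h
    have : n = 0 := by simpa using h
    subst this
    simp [Nat.toDigitsCore, dsum]
  | succ f ih =>
    intro n l h
    rw [Nat.toDigitsCore]
    by_cases h0 : n / 10 = 0
    · have hn : n < 10 := by omega
      simp only [h0, if_pos]
      rw [List.map_cons, List.sum_cons, digitVal_digitChar _ (Nat.mod_lt _ (by omega))]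
      rw [dsum]
      simp [hn, Nat.mod_eq_of_lt hn]
    · simp only [h0, if_false]
      rw [ih (n / 10) _ (Nat.div_lt_of_lt_mul (by rw [← pow_succ']; exact h))]
      rw [List.map_cons, List.sum_cons, digitVal_digitChar _ (Nat.mod_lt _ (by omega))]
      conv_rhs => rw [dsum]
      have hn : ¬ n < 10 := by omega
      simp only [hn, if_false]
      push_cast
      ring

lemma lt_ten_pow (m : Nat) : m < 10 ^ (m + 1) := by
  calc m < 2 ^ (m+1) := by
        have := Nat.lt_two_pow_self (n := m); omega
    _ ≤ 10 ^ (m+1) := Nat.pow_le_pow_left (by omega) _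

lemma digitSumA_natCast (m : Nat) : digitSumA (m : Int) = (dsum m : Int) := by
  unfold digitSumA PySem.Int.toChars
  have h1 : ¬ ((m : Int) < 0) := by omega
  simp only [h1, if_false, Int.toNat_natCast, Nat.toDigits]
  rw [charsum_toDigitsCore (m + 1) m [] (lt_ten_pow m)]
  simp

lemma dsum_lt (n : Nat) (h : 10 ≤ n) : dsum n < n := by
  induction n using Nat.strong_induction_on with
  | _ n ih =>
  rw [dsum]
  simp only [show ¬ n < 10 by omega, if_false]
  by_cases h2 : n / 10 < 10
  · rw [dsum, if_pos h2]; omega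
  · have := ih (n / 10) (Nat.div_lt_self (by omega) (by omega)) (by omega)
    omega

lemma dsum_mod9 (n : Nat) : dsum n % 9 = n % 9 := by
  induction n using Nat.strong_induction_on with
  | _ n ih =>
  rw [dsum]
  by_cases hn : n < 10
  · simp [hn]
  · simp only [hn, if_false]
    have := ih (n / 10) (Nat.div_lt_self (by omega) (by omega))
    omega

lemma dsum_pos (n : Nat) (h : 0 < n) : 0 < dsum n := by
  induction n using Nat.strong_induction_on with
  | _ n ih =>
  rw [dsum]
  by_cases hn : n < 10
  · simp [hn]; omega
  · simp only [hn, if_false]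
    have := ih (n / 10) (Nat.div_lt_self (by omega) (by omega)) (by omega)
    omega

lemma drootN_dsum (m : Nat) : drootN (dsum m) = drootN m := by
  by_cases hm : m = 0
  · subst hm; rw [dsum]; simp
  · have h1 := dsum_mod9 m
    have h2 := dsum_pos m (by omega)
    unfold drootN
    split_ifs <;> omega

lemma collapseA_eq (m : Nat) : ∀ f : Nat, m ≤ f + 9 → collapseA f (m : Int) = (drootN m : Int) := by
  induction m using Nat.strong_induction_on with
  | _ m ih =>
  intro f hf
  by_cases hm : m ≤ 9
  · have h9 : ¬ ((m : Int) > 9) := by omega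
    cases f with
    | zero => unfold collapseA drootN; split <;> omega
    | succ f => rw [collapseA]; simp only [h9, if_false]; unfold drootN; split <;> omega
  · obtain ⟨f', rfl⟩ : ∃ f', f = f' + 1 := ⟨f - 1, by omega⟩
    rw [collapseA]
    simp only [show ((m : Int) > 9) by omega, if_pos]
    rw [digitSumA_natCast]
    have hlt : dsum m < m := dsum_lt m (by omega)
    rw [ih (dsum m) hlt f' (by omega)]
    rw [drootN_dsum]

lemma rootB_natCast (m : Nat) : rootB (m : Int) = (drootN m : Int) := by
  unfold rootB drootN
  by_cases hm : m = 0
  · simp [hm]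
  · have : ((m : Int) - 1) = ((m - 1 : Nat) : Int) := by omega
    simp only [show ¬ ((m:Int) = 0) by omega, if_false, hm, this]
    rw [PySem.Int.mod_eq_emod_of_pos (by omega)]
    push_cast
    omega

lemma pieceA_eq (num : Int) (h : 0 ≤ num) : pieceA num = pieceB (rootB num) := by
  obtain ⟨m, rfl⟩ : ∃ m : Nat, num = (m : Int) := ⟨num.toNat, by omega⟩
  unfold pieceA pieceB
  rw [digitSumA_natCast, Int.toNat_natCast, collapseA_eq (dsum m) (dsum m) (by omega),
      drootN_dsum, rootB_natCast]
  simp only []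
  have : (97 + (drootN m : Int) - 1) = 96 + (drootN m : Int) := by ring
  rw [this]

-- ===== VERDICT (by name: the statements are the Claim_ definitions above) =====
theorem generate_pin_spec : Claim_equal_generate_pin := by
  intro numbers _ hpre
  unfold Spec_generate_pin generate_pin generate_pin_alt
  rw [PySem.List.foldl_append_eq_flatMap, List.nil_append, List.map_map]
  exact congrArg (fun l : List (List Char) => String.ofList l.flatten)
    (List.map_congr_left (fun n hn => pieceA_eq n (hpre n hn)))
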